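-- pv_equiv track=rewrite | github.com/cjfal2/aLGoRiTHM | 백준/Silver/23779. Silver Star Stands Alone/Silver Star Stands Alone.py | count_trajectories
-- ===== SOURCE A (Python) =====
-- def count_trajectories(P):
--     # 에라토스테네스의 체를 이용하여 P 이하의 소수 찾기
--     sieve = [True] * (P + 1)
--     sieve[0] = sieve[1] = False
--     primes = []
--
--     for i in range(2, P + 1):
--         if sieve[i]:
--             primes.append(i)
--             for j in range(i * i, P + 1, i):
--                 sieve[j] = False
--
--     # DP 배열 초기화
--     dp = [0] * len(primes)
--     dp[0] = 1  # 항상 2는 방문해야 하므로 1로 설정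
--
--     # DP 계산
--     for i in range(1, len(primes)):
--         for j in range(i - 1, -1, -1):
--             if primes[i] - primes[j] > 14:
--                 break  # 14를 초과하면 중단
--             dp[i] += dp[j]
--
--     return dp[-1]  # 마지막 소수를 방문하는 모든 경우의 수
-- ===== SOURCE B (Python) =====
-- def count_trajectories(P):
--     # sieve kept exactly as in A (same behaviour, same exceptions on small P)
--     sieve = [True] * (P + 1)
--     sieve[0] = sieve[1] = False
--     primes = []
--     for i in range(2, P + 1):
--         if sieve[i]:
--             primes.append(i)
--             for j in range(i * i, P + 1, i):
--                 sieve[j] = False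
--
--     # DP rewritten as a single forward pass with a sliding-window running sum:
--     # window always holds dp[left] + ... + dp[i-1], the sum of dp over the
--     # primes within gap 14 of primes[i]; no nested backward scan.
--     dp = [1]
--     window = 1
--     left = 0
--     for i in range(1, len(primes)):
--         while primes[i] - primes[left] > 14:
--             window -= dp[left]
--             left += 1
--         dp.append(window)
--         window += dp[-1]
--     return dp[-1]
-- ===== Notes on version B (the rewrite author's own statement) =====
-- stated objective: alternative
-- what changed: The nested backward DP scan with break is replaced by a single forward pass maintaining a two-pointer sliding-window running sum (window/left), so each dp value is read once instead of rescanned; the sieve is kept identical. Pre_ excludes only the inputs where A raises IndexError (P smaller than the first prime, so the sieve/dp lists are too short to index).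
import Mathlib
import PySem

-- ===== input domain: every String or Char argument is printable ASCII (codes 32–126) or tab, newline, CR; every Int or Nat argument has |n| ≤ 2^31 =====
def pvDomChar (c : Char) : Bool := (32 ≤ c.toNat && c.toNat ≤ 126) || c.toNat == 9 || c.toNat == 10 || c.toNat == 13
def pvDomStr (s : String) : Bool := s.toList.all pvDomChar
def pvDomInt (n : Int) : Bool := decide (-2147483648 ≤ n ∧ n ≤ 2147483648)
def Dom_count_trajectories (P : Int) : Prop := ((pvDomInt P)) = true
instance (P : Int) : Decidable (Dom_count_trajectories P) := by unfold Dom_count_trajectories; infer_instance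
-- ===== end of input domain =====

-- B keeps A's sieve verbatim and replaces only the DP: the nested backward scan
-- with break becomes one forward pass with a sliding-window running sum (alternative decomposition).

-- ===== PORT A =====
-- shared sieve helper (the sieve code is byte-identical in A and B)
def pvSieveLoop (P : Int) : List Int → List Bool → List Int → List Bool × List Int
  | [], sieve, primes => (sieve, primes)
  | i :: is, sieve, primes =>
    if sieve.getD i.toNat false then
      pvSieveLoop P is
        ((PySem.List.pyRange (i*i) (P+1) i).foldl (fun s j => s.set j.toNat false) sieve)
        (primes ++ [i])
    else pvSieveLoop P is sieve primes

def pvPrimes (P : Int) : List Int :=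
  (pvSieveLoop P (PySem.List.pyRange 2 (P+1) 1)
    (((List.replicate (P+1).toNat true).set 0 false).set 1 false) []).2

-- inner backward loop of A: 'for j in range(i-1,-1,-1): if primes[i]-primes[j]>14: break; dp[i]+=dp[j]'
def pvInnerA (primes : List Int) (i : Int) : List Int → List Int → List Int
  | [], dp => dp
  | j :: js, dp =>
    if PySem.List.pyGetD primes i 0 - PySem.List.pyGetD primes j 0 > 14 then dp
    else pvInnerA primes i js
      (PySem.List.pySetD dp i (PySem.List.pyGetD dp i 0 + PySem.List.pyGetD dp j 0))

def count_trajectories (P : Int) : Int :=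
  let primes := pvPrimes P
  let dp0 := (List.replicate primes.length (0:Int)).set 0 1
  let dp := (PySem.List.pyRange 1 (primes.length : Int) 1).foldl
      (fun dp i => pvInnerA primes i (PySem.List.pyRange (i-1) (-1) (-1)) dp) dp0
  PySem.List.pyGetD dp (-1) 0

-- ===== PORT B =====
-- while-loop of B: 'while primes[i]-primes[left] > 14: window -= dp[left]; left += 1'
-- (fuel only makes the recursion total; inside Pre_ the loop always exits before left passes i)
def pvAdvance (primes dp : List Int) (pi : Int) : Nat → Int × Int → Int × Int
  | 0, wl => wl
  | fuel+1, (window, left) =>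
    if pi - PySem.List.pyGetD primes left 0 > 14 then
      pvAdvance primes dp pi fuel (window - PySem.List.pyGetD dp left 0, left + 1)
    else (window, left)

def count_trajectories_alt (P : Int) : Int :=
  let primes := pvPrimes P
  let s := (PySem.List.pyRange 1 (primes.length : Int) 1).foldl
    (fun (s : List Int × Int × Int) i =>
      let wl := pvAdvance primes s.1 (PySem.List.pyGetD primes i 0) (i.toNat + 1) (s.2.1, s.2.2)
      let dp' := s.1 ++ [wl.1]
      (dp', wl.1 + PySem.List.pyGetD dp' (-1) 0, wl.2))
    ([1], 1, 0)
  PySem.List.pyGetD s.1 (-1) 0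

-- ===== PRECONDITION & SPEC =====
-- Pre_ excludes exactly the inputs where the Python A raises IndexError: P below the first prime,
-- where the sieve (or the dp array built from an empty primes list) is too short to index.
def Pre_count_trajectories (P : Int) : Prop := 2 ≤ P
instance (P : Int) : Decidable (Pre_count_trajectories P) := by unfold Pre_count_trajectories; infer_instance
def pvWitness_count_trajectories : Int := 5

def Spec_count_trajectories (P : Int) (out : Int) : Prop := out = count_trajectories_alt P
instance (P : Int) (out : Int) : Decidable (Spec_count_trajectories P out) := by unfold Spec_count_trajectories; infer_instance

-- ===== CLAIM (what is proved, stated in full; the proofs are below) =====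
def Claim_equal_count_trajectories : Prop := ∀ (P : Int), Dom_count_trajectories P → Pre_count_trajectories P → Spec_count_trajectories P (count_trajectories P)

-- ===== LEMMAS AND PROOFS =====

-- sum of dp over indices [a, b)
def pvS (dp : List Int) (a b : Nat) : Int := ∑ j ∈ Finset.Ico a b, dp.getD j 0

-- setting an entry to its own value is the identity
theorem pvSet_getD_self (l : List Int) (n : Nat) : l.set n (l.getD n 0) = l := by
  induction l generalizing n with
  | nil => simp
  | cons a t ih => cases n with
    | zero => simp [List.getD]
    | succ m =>
      rw [List.getD_cons_succ, List.set_cons_succ, ih m]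

-- the primes list produced by the sieve loop extends the accumulator with elements of the index list
theorem pvSieveLoop_primes (P : Int) (is : List Int) (sieve : List Bool) (acc : List Int) :
    ∃ l, (pvSieveLoop P is sieve acc).2 = acc ++ l ∧ ∀ x ∈ l, x ∈ is := by
  induction is generalizing sieve acc with
  | nil => exact ⟨[], by simp [pvSieveLoop]⟩
  | cons i is ih =>
    by_cases h : sieve.getD i.toNat false
    · obtain ⟨l, hl, hm⟩ := ih ((PySem.List.pyRange (i*i) (P+1) i).foldl (fun s j => s.set j.toNat false) sieve) (acc ++ [i])
      refine ⟨i :: l, ?_, ?_⟩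
      · simp only [pvSieveLoop, h, if_true]
        simpa using hl
      · intro x hx
        rcases List.mem_cons.mp hx with hx | hx
        · subst hx; exact List.mem_cons_self
        · exact List.mem_cons_of_mem _ (hm x hx)
    · obtain ⟨l, hl, hm⟩ := ih sieve acc
      refine ⟨l, ?_, fun x hx => List.mem_cons_of_mem _ (hm x hx)⟩
      simp only [pvSieveLoop, h, if_false]
      exact hl

theorem pvSieveLoop_sorted (P : Int) (is : List Int) (sieve : List Bool) (acc : List Int)
    (hacc : acc.Pairwise (· < ·)) (hlt : ∀ a ∈ acc, ∀ x ∈ is, a < x)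
    (his : is.Pairwise (· < ·)) :
    ((pvSieveLoop P is sieve acc).2).Pairwise (· < ·) := by
  induction is generalizing sieve acc with
  | nil => simpa [pvSieveLoop] using hacc
  | cons i is ih =>
    have his' : is.Pairwise (· < ·) := (List.pairwise_cons.mp his).2
    have hihd : ∀ x ∈ is, i < x := (List.pairwise_cons.mp his).1
    by_cases h : sieve.getD i.toNat false
    · simp only [pvSieveLoop, h, if_true]
      refine ih _ (acc ++ [i]) ?_ ?_ his'
      · refine List.pairwise_append.mpr ⟨hacc, by simp, ?_⟩
        intro a ha b hb; simp at hb; subst hb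
        exact hlt a ha _ List.mem_cons_self
      · intro a ha x hx
        rcases List.mem_append.mp ha with ha | ha
        · exact hlt a ha x (List.mem_cons_of_mem _ hx)
        · simp at ha; subst ha; exact hihd x hx
    · simp only [pvSieveLoop, h, if_false]
      exact ih sieve acc hacc (fun a ha x hx => hlt a ha x (List.mem_cons_of_mem _ hx)) his'

-- the primes list is strictly increasing
theorem pvPrimes_sorted (P : Int) : (pvPrimes P).Pairwise (· < ·) := by
  unfold pvPrimes
  exact pvSieveLoop_sorted P _ _ [] (by simp) (by simp) (PySem.List.pairwise_lt_pyRange_one 2 (P+1))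

theorem pvPrimes_ne_nil (P : Int) (hP : 2 ≤ P) : pvPrimes P ≠ [] := by
  unfold pvPrimes
  rw [PySem.List.pyRange_one_cons (by omega : (2:Int) < P+1)]
  have hget : (((List.replicate (P+1).toNat true).set 0 false).set 1 false).getD (2:Int).toNat false = true := by
    have h2 : 2 < (P+1).toNat := by omega
    simp [List.getD_eq_getElem?_getD, List.getElem?_set, List.getElem?_replicate, h2]
  simp only [pvSieveLoop, hget, if_true]
  obtain ⟨l, hl, -⟩ := pvSieveLoop_primes P (PySem.List.pyRange (2+1) (P+1) 1)
    ((PySem.List.pyRange (2*2) (P+1) 2).foldl (fun s j => s.set j.toNat false)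
      (((List.replicate (P+1).toNat true).set 0 false).set 1 false)) ([] ++ [2])
  rw [hl]; simp

-- monotone reads from a sorted list
theorem pvMono (p : List Int) (hp : p.Pairwise (· < ·)) (j k : Nat)
    (hjk : j ≤ k) (hk : k < p.length) : p.getD j 0 ≤ p.getD k 0 := by
  rcases Nat.lt_or_ge j k with h | h
  · have hj : j < p.length := lt_trans h hk
    have hlt := List.pairwise_iff_getElem.mp hp j k hj hk h
    rw [List.getD_eq_getElem?_getD, List.getD_eq_getElem?_getD,
        List.getElem?_eq_getElem hj, List.getElem?_eq_getElem hk]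
    exact le_of_lt hlt
  · have : j = k := le_antisymm hjk h
    subst this; rfl

-- A's inner loop computes a suffix-window sum into dp[i]
theorem pvInnerA_eq (p : List Int) (i : Nat) (hi : i < p.length) :
    ∀ (a : Nat) (ℓ : Nat) (dp : List Int), i < dp.length → a ≤ i → ℓ ≤ a →
    (∀ j, ℓ ≤ j → j < a → p.getD i 0 - p.getD j 0 ≤ 14) →
    (ℓ = 0 ∨ 14 < p.getD i 0 - p.getD (ℓ-1) 0) →
    pvInnerA p (i:Int) (PySem.List.pyRange ((a:Int)-1) (-1) (-1)) dp
      = dp.set i (dp.getD i 0 + pvS dp ℓ a) := by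
  intro a
  induction a with
  | zero =>
    intro ℓ dp hdp ha hℓ hwin hbd
    have hℓ0 : ℓ = 0 := Nat.le_zero.mp hℓ
    subst hℓ0
    rw [PySem.List.pyRange_neg_one_eq_nil (by omega)]
    show dp = _
    rw [show pvS dp 0 0 = 0 from by simp [pvS], add_zero, pvSet_getD_self]
  | succ a ih =>
    intro ℓ dp hdp ha hℓ hwin hbd
    have hrange : PySem.List.pyRange ((↑(a+1):Int)-1) (-1) (-1)
        = (a:Int) :: PySem.List.pyRange ((a:Int)-1) (-1) (-1) := by
      have h1 : ((↑(a+1):Int)-1) = (a:Int) := by push_cast; ring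
      rw [h1, PySem.List.pyRange_neg_one_cons (by omega)]
    rw [hrange]
    by_cases hc : 14 < p.getD i 0 - p.getD a 0
    · -- break: the window must be empty, ℓ = a+1
      have hℓ1 : ℓ = a + 1 := by
        by_contra hne
        have hlt : ℓ ≤ a := by omega
        have := hwin a hlt (Nat.lt_succ_self a)
        omega
      subst hℓ1
      simp only [pvInnerA, PySem.List.pyGetD_natCast, if_pos hc]
      rw [show pvS dp (a+1) (a+1) = 0 from by simp [pvS], add_zero, pvSet_getD_self]
    · -- accumulate dp[a] and recurse
      have hℓa : ℓ ≤ a := by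
        by_contra hgt
        have hℓ1 : ℓ = a + 1 := by omega
        rcases hbd with h0 | hb
        · omega
        · rw [hℓ1, Nat.add_sub_cancel] at hb
          omega
      simp only [pvInnerA, PySem.List.pyGetD_natCast, if_neg hc, PySem.List.pySetD_natCast]
      rw [ih ℓ (dp.set i (dp.getD i 0 + dp.getD a 0)) (by simpa using hdp) (by omega) hℓa
            (fun j h1 h2 => hwin j h1 (by omega)) hbd]
      have hia : a < i := by omega
      have hgi : (dp.set i (dp.getD i 0 + dp.getD a 0)).getD i 0
          = dp.getD i 0 + dp.getD a 0 := by
        rw [List.getD_eq_getElem?_getD, List.getElem?_set_self (by simpa using hdp)]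
        rfl
      have hS : pvS (dp.set i (dp.getD i 0 + dp.getD a 0)) ℓ a = pvS dp ℓ a := by
        unfold pvS
        refine Finset.sum_congr rfl (fun j hj => ?_)
        have hj' : j < a := (Finset.mem_Ico.mp hj).2
        simp only [List.getD_eq_getElem?_getD]
        rw [List.getElem?_set_ne (by omega)]
      rw [hgi, hS, List.set_set]
      congr 1
      unfold pvS
      rw [Finset.sum_Ico_succ_top hℓa]
      ring

-- B's while loop: characterisation of the advanced (window,left)
theorem pvAdvance_eq (p dp : List Int) (i : Nat) (hi : i < p.length) :
    ∀ (fuel : Nat) (window : Int) (lN : Nat), i - lN < fuel → lN ≤ i →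
    window = pvS dp lN i →
    ∃ l' : Nat, pvAdvance p dp (p.getD i 0) fuel (window, (lN:Int)) = (pvS dp l' i, (l':Int))
      ∧ lN ≤ l' ∧ l' ≤ i ∧ p.getD i 0 - p.getD l' 0 ≤ 14
      ∧ ∀ j, lN ≤ j → j < l' → 14 < p.getD i 0 - p.getD j 0 := by
  intro fuel
  induction fuel with
  | zero => intro window lN hfuel; omega
  | succ fuel ih =>
    intro window lN hfuel hlN hw
    by_cases hc : 14 < p.getD i 0 - p.getD lN 0
    · have hlt : lN < i := by
        by_contra h
        have : lN = i := by omega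
        subst this; omega
      have hw' : window - dp.getD lN 0 = pvS dp (lN+1) i := by
        rw [hw]
        unfold pvS
        rw [Finset.sum_eq_sum_Ico_succ_bot hlt]
        ring
      obtain ⟨l', heq, h1, h2, h3, h4⟩ := ih (window - dp.getD lN 0) (lN+1)
        (by omega) (by omega) hw'
      refine ⟨l', ?_, by omega, h2, h3, ?_⟩
      · simp only [pvAdvance, PySem.List.pyGetD_natCast, if_pos hc]
        rw [show (((lN+1 : Nat)) : Int) = (lN:Int) + 1 from by push_cast; ring] at heq
        exact heq
      · intro j hj1 hj2
        rcases Nat.lt_or_ge j (lN+1) with h | h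
        · have : j = lN := by omega
          subst this; exact hc
        · exact h4 j h hj2
    · refine ⟨lN, ?_, le_refl _, hlN, by omega, fun j h1 h2 => absurd h1 (by omega)⟩
      simp only [pvAdvance, PySem.List.pyGetD_natCast, if_neg hc]
      rw [hw]

-- sums over an appended list restricted to the original indices are unchanged
theorem pvS_append (dpB t : List Int) (a b : Nat) (hb : b ≤ dpB.length) :
    pvS (dpB ++ t) a b = pvS dpB a b := by
  unfold pvS
  refine Finset.sum_congr rfl (fun j hj => ?_)
  have hj' : j < dpB.length := lt_of_lt_of_le (Finset.mem_Ico.mp hj).2 hb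
  exact List.getD_append dpB t 0 j hj'

-- the joint invariant of the two DP loops after processing indices 1..k-1
theorem pv_inv (p : List Int) (hp : p.Pairwise (· < ·)) :
    ∀ k : Nat, 1 ≤ k → k ≤ p.length →
    ∃ (dpB : List Int) (lN : Nat),
      ((PySem.List.pyRange 1 (k:Int) 1).foldl
        (fun (s : List Int × Int × Int) i =>
          let wl := pvAdvance p s.1 (PySem.List.pyGetD p i 0) (i.toNat + 1) (s.2.1, s.2.2)
          let dp' := s.1 ++ [wl.1]
          (dp', wl.1 + PySem.List.pyGetD dp' (-1) 0, wl.2)) ([1], 1, 0))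
        = (dpB, pvS dpB lN k, (lN:Int))
      ∧ ((PySem.List.pyRange 1 (k:Int) 1).foldl
        (fun dp i => pvInnerA p i (PySem.List.pyRange (i-1) (-1) (-1)) dp)
        ((List.replicate p.length (0:Int)).set 0 1))
        = dpB ++ List.replicate (p.length - k) 0
      ∧ dpB.length = k ∧ lN < k
      ∧ ∀ j, j < lN → 14 < p.getD (k-1) 0 - p.getD j 0 := by
  intro k
  induction k with
  | zero => omega
  | succ k ihk =>
    intro h1 hk
    rcases Nat.eq_zero_or_pos k with hk0 | hkpos
    · -- base case k+1 = 1: both loops are empty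
      subst hk0
      refine ⟨[1], 0, ?_, ?_, by simp, by omega, by omega⟩
      · rw [show ((1:Nat):Int) = (1:Int) from by norm_num,
           PySem.List.pyRange_one_eq_nil (le_refl _)]
        simp only [List.foldl_nil]
        have h1 : pvS [1] 0 1 = 1 := by norm_num [pvS]
        rw [h1]
        norm_num
      · rw [show ((1:Nat):Int) = (1:Int) from by norm_num,
           PySem.List.pyRange_one_eq_nil (le_refl _)]
        simp only [List.foldl_nil]
        rcases hn : p.length with _ | m
        · omega
        · simp [List.replicate_succ]
    · -- inductive step: process index k
      obtain ⟨dpB, lN, hB, hA, hlen, hlNk, hbad⟩ := ihk hkpos (by omega)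
      have hkp : k < p.length := by omega
      have hrange : PySem.List.pyRange 1 ((k+1 : Nat):Int) 1
          = PySem.List.pyRange 1 (k:Int) 1 ++ [(k:Int)] := by
        rw [show (((k+1:Nat)):Int) = (k:Int) + 1 from by push_cast; ring]
        exact PySem.List.pyRange_one_succ_right (by exact_mod_cast hkpos)
      -- the advanced (window,left)
      obtain ⟨l', heq, hl1, hl2, hl3, hl4⟩ := pvAdvance_eq p dpB k hkp (k+1)
        (pvS dpB lN k) lN (by omega) (by omega) rfl
      have hmonoK : p.getD (k-1) 0 ≤ p.getD k 0 := pvMono p hp (k-1) k (by omega) hkp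
      have hbadK : ∀ j, j < l' → 14 < p.getD k 0 - p.getD j 0 := by
        intro j hj
        rcases Nat.lt_or_ge j lN with h | h
        · have := hbad j h; omega
        · exact hl4 j h hj
      have hwinK : ∀ j, l' ≤ j → j < k → p.getD k 0 - p.getD j 0 ≤ 14 := by
        intro j hj1 hj2
        have := pvMono p hp l' j hj1 (by omega)
        omega
      have hbdK : l' = 0 ∨ 14 < p.getD k 0 - p.getD (l'-1) 0 := by
        rcases Nat.eq_zero_or_pos l' with h | h
        · exact Or.inl h
        · exact Or.inr (hbadK (l'-1) (by omega))
      refine ⟨dpB ++ [pvS dpB l' k], l', ?_, ?_, by simp [hlen], by omega, ?_⟩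
      · -- B side step
        rw [hrange, List.foldl_append, hB]
        simp only [List.foldl_cons, List.foldl_nil]
        rw [show ((k:Int)).toNat = k from Int.toNat_natCast k]
        simp only [PySem.List.pyGetD_natCast]
        rw [heq]
        simp only [PySem.List.pyGetD_neg_one_append_singleton]
        have h1 : pvS (dpB ++ [pvS dpB l' k]) l' (k+1)
            = pvS (dpB ++ [pvS dpB l' k]) l' k + (dpB ++ [pvS dpB l' k]).getD k 0 := by
          unfold pvS
          rw [Finset.sum_Ico_succ_top hl2]
        have h2 : pvS (dpB ++ [pvS dpB l' k]) l' k = pvS dpB l' k :=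
          pvS_append _ _ _ _ (le_of_eq hlen.symm)
        have h3 : (dpB ++ [pvS dpB l' k]).getD k 0 = pvS dpB l' k := by
          rw [List.getD_append_right dpB _ 0 k (le_of_eq hlen), hlen, Nat.sub_self]
          rfl
        rw [h1, h2, h3]
      · -- A side step
        rw [hrange, List.foldl_append, hA]
        simp only [List.foldl_cons, List.foldl_nil]
        rw [pvInnerA_eq p k hkp k l' (dpB ++ List.replicate (p.length - k) 0)
              (by simp [hlen]; omega) (le_refl _) hl2 hwinK hbdK]
        have hget0 : (dpB ++ List.replicate (p.length - k) 0).getD k 0 = 0 := by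
          rw [List.getD_append_right dpB _ 0 k (le_of_eq hlen), hlen, Nat.sub_self]
          rcases hm : p.length - k with _ | m
          · omega
          · simp [List.replicate_succ]
        have hSA : pvS (dpB ++ List.replicate (p.length - k) 0) l' k = pvS dpB l' k := by
          exact pvS_append _ _ _ _ (le_of_eq hlen.symm)
        rw [hget0, hSA, zero_add]
        rw [← hlen, List.set_append_right _ _ (le_refl _)]
        rw [Nat.sub_self]
        rcases hm : p.length - dpB.length with _ | m
        · omega
        · simp only [List.replicate_succ, List.set_cons_zero]
          rw [List.append_cons]
          congr 2
          omega
      · -- the bad-prefix fact at the new index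
        intro j hj
        simpa using hbadK j hj

theorem pv_main (P : Int) (hP : 2 ≤ P) : count_trajectories P = count_trajectories_alt P := by
  have hp := pvPrimes_sorted P
  have hne := pvPrimes_ne_nil P hP
  have hn : 1 ≤ (pvPrimes P).length := List.length_pos_iff.mpr hne
  obtain ⟨dpB, lN, hB, hA, hlen, hlNk, hbad⟩ := pv_inv (pvPrimes P) hp (pvPrimes P).length hn (le_refl _)
  unfold count_trajectories count_trajectories_alt
  simp only []
  rw [hA, hB]
  simp

-- ===== VERDICT (by name: the statement is the Claim_ definition above) =====
theorem count_trajectories_spec : Claim_equal_count_trajectories := by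
  intro P _ hpre
  unfold Spec_count_trajectories
  exact pv_main P hpre
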